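-- pv_equiv track=rewrite | github.com/fecgov/openFEC-web-app | openfecwebapp/views.py | get_legal_category_order
-- ===== SOURCE A (Python) =====
-- def get_legal_category_order(results, murs_enabled=True):
--     """ Return categories in pre-defined order, moving categories with empty results
--         to the end. MURs must be at the end if not enabled.
--     """
--     if murs_enabled:
--         categories = ["statutes", "regulations", "advisory_opinions", "murs"]
--         category_order = [x for x in categories if results.get("total_" + x, 0) > 0] +\
--                         [x for x in categories if results.get("total_" + x, 0) == 0]
--     else:
--         categories = ["statutes", "regulations", "advisory_opinions"]
--         category_order = [x for x in categories if results.get("total_" + x, 0) > 0] +\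
--                         [x for x in categories if results.get("total_" + x, 0) == 0] +\
--                         ["murs"]
--     return category_order
-- ===== SOURCE B (Python) =====
-- def get_legal_category_order(results, murs_enabled=True):
--     """ Return categories in pre-defined order, moving categories with empty results
--         to the end (one stable sort on an empty/nonempty key). MURs must be at the
--         end if not enabled.
--     """
--     categories = ["statutes", "regulations", "advisory_opinions"]
--     if murs_enabled:
--         categories.append("murs")
--     order = sorted(categories, key=lambda x: 0 if results.get("total_" + x, 0) > 0 else 1)
--     if not murs_enabled:
--         order.append("murs")
--     return order
-- ===== Notes on version B (the rewrite author's own statement) =====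
-- stated objective: idiomatic
-- what changed: Replaces A's two filter-comprehensions (nonempty categories, then empty ones) with a single stable sort over the fixed category list keyed on 0 for nonempty / 1 for empty totals, with murs appended after sorting when disabled.
-- intended difference: On inputs where some category's 'total_' value is negative, A silently drops that category from the returned list (it passes neither the >0 nor the ==0 comprehension), while B keeps every category and places those without positive totals at the end, which is the intended 'empty results last' ordering. — e.g. on get_legal_category_order([("total_statutes", -1)], true): A returns ["regulations", "advisory_opinions", "murs"], B returns ["statutes", "regulations", "advisory_opinions", "murs"]
import Mathlib
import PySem

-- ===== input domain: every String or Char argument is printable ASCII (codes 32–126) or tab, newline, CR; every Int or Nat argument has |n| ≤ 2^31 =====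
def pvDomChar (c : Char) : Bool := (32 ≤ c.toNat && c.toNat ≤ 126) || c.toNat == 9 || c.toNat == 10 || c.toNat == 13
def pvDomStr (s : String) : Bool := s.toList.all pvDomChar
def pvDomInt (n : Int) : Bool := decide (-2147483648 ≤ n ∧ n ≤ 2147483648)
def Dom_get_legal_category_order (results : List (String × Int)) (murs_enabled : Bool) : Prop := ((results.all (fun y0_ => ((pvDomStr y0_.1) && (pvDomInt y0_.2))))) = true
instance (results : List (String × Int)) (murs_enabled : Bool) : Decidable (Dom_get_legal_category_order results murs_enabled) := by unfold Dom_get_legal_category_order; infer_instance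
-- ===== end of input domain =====

-- B replaces A's two filter-comprehensions by a single stable sort on an empty/nonempty key (idiomatic decomposition; same cost); on inputs with a negative 'total_' value B keeps the category (at the end) where A silently drops it — see D_ below.


-- ===== PORT A =====
-- results.get("total_" + x, 0): Python dict.get on the association list = first-match lookup, default 0 (exact: keys of a dict are unique)
def pvGet (results : List (String × Int)) (k : String) : Int :=
  match results.find? (fun p => p.1 == k) with
  | some p => p.2
  | none => 0

def get_legal_category_order (results : List (String × Int)) (murs_enabled : Bool) : List String :=
  if murs_enabled then
    let categories := ["statutes", "regulations", "advisory_opinions", "murs"]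
    (categories.filter (fun x => decide (0 < pvGet results ("total_" ++ x)))) ++
    (categories.filter (fun x => decide (pvGet results ("total_" ++ x) = 0)))
  else
    let categories := ["statutes", "regulations", "advisory_opinions"]
    (categories.filter (fun x => decide (0 < pvGet results ("total_" ++ x)))) ++
    (categories.filter (fun x => decide (pvGet results ("total_" ++ x) = 0))) ++
    ["murs"]

-- ===== PORT B =====
def get_legal_category_order_alt (results : List (String × Int)) (murs_enabled : Bool) : List String :=
  let categories := ["statutes", "regulations", "advisory_opinions"] ++
    (if murs_enabled then ["murs"] else [])
  let order := PySem.List.sorted categories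
    (fun x => if 0 < pvGet results ("total_" ++ x) then (0 : Int) else 1) false
  if murs_enabled then order else order ++ ["murs"]

-- ===== PRECONDITION & SPEC =====
-- On inputs where some considered category has a negative 'total_' value, A silently drops
-- that category from the returned list, while B keeps every category and places those without
-- positive totals at the end, which is the intended 'empty results last' ordering.
def D_get_legal_category_order (results : List (String × Int)) (murs_enabled : Bool) : Prop :=
  (results.lookup "total_statutes").getD 0 < 0 ∨
  (results.lookup "total_regulations").getD 0 < 0 ∨
  (results.lookup "total_advisory_opinions").getD 0 < 0 ∨
  (murs_enabled = true ∧ (results.lookup "total_murs").getD 0 < 0)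
instance (results : List (String × Int)) (murs_enabled : Bool) : Decidable (D_get_legal_category_order results murs_enabled) := by unfold D_get_legal_category_order; infer_instance

def Spec_get_legal_category_order (results : List (String × Int)) (murs_enabled : Bool) (out : List String) : Prop := ¬ D_get_legal_category_order results murs_enabled → out = get_legal_category_order_alt results murs_enabled
instance (results : List (String × Int)) (murs_enabled : Bool) (out : List String) : Decidable (Spec_get_legal_category_order results murs_enabled out) := by unfold Spec_get_legal_category_order; infer_instance

def pvDiffWitness_get_legal_category_order : (List (String × Int)) × Bool := ([("total_statutes", -1)], true)
def pvDiffWitnessOut_get_legal_category_order : (List String) × (List String) :=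
  (["regulations", "advisory_opinions", "murs"],
   ["statutes", "regulations", "advisory_opinions", "murs"])

-- ===== CLAIM (what is proved, stated in full; the proofs are below) =====
def Claim_unchanged_get_legal_category_order : Prop := ∀ (results : List (String × Int)) (murs_enabled : Bool), Dom_get_legal_category_order results murs_enabled → Spec_get_legal_category_order results murs_enabled (get_legal_category_order results murs_enabled)
def Claim_changed_get_legal_category_order : Prop := Dom_get_legal_category_order (pvDiffWitness_get_legal_category_order.1) (pvDiffWitness_get_legal_category_order.2) ∧ D_get_legal_category_order (pvDiffWitness_get_legal_category_order.1) (pvDiffWitness_get_legal_category_order.2) ∧ get_legal_category_order (pvDiffWitness_get_legal_category_order.1) (pvDiffWitness_get_legal_category_order.2) = pvDiffWitnessOut_get_legal_category_order.1 ∧ get_legal_category_order_alt (pvDiffWitness_get_legal_category_order.1) (pvDiffWitness_get_legal_category_order.2) = pvDiffWitnessOut_get_legal_category_order.2 ∧ pvDiffWitnessOut_get_legal_category_order.1 ≠ pvDiffWitnessOut_get_legal_category_order.2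
def Claim_exact_get_legal_category_order : Prop := ∀ (results : List (String × Int)) (murs_enabled : Bool), Dom_get_legal_category_order results murs_enabled → D_get_legal_category_order results murs_enabled → get_legal_category_order results murs_enabled ≠ get_legal_category_order_alt results murs_enabled

-- ===== LEMMAS AND PROOFS =====

-- D_'s lookup agrees with the ports' dict.get.
theorem lookup_eq_pvGet (results : List (String × Int)) (k : String) :
    (results.lookup k).getD 0 = pvGet results k := by
  induction results with
  | nil => rfl
  | cons p rest ih =>
    obtain ⟨a, v⟩ := p
    by_cases h : a = k
    · simp [List.lookup, pvGet, List.find?, h]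
    · have hbeq : (a == k) = false := by simpa using h
      have hbeq' : (k == a) = false := by simpa using fun e => h e.symm
      simp only [List.lookup, pvGet, List.find?, hbeq, hbeq'] at ih ⊢
      exact ih

-- D_ as an existential over the key list.
theorem D_iff (results : List (String × Int)) (murs_enabled : Bool) :
    D_get_legal_category_order results murs_enabled ↔
    ∃ k ∈ (["total_statutes", "total_regulations", "total_advisory_opinions"] ++
        (if murs_enabled then ["total_murs"] else [])),
      (results.lookup k).getD 0 < 0 := by
  unfold D_get_legal_category_order
  cases murs_enabled <;> simp

-- D_'s key list is the ports' category list under the 'total_' prefix.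
theorem keys_bridge (murs : Bool) :
    (["total_statutes", "total_regulations", "total_advisory_opinions"] ++
      (if murs then ["total_murs"] else [])) =
    (["statutes", "regulations", "advisory_opinions"] ++
      (if murs then ["murs"] else [])).map (fun x => "total_" ++ x) := by
  cases murs <;> decide

-- Inserting y after every element (y "before" none of them) appends it.
theorem insertBy_all_false {α : Type} (before : α → α → Bool) (y : α) (l : List α)
    (h : ∀ z ∈ l, before y z = false) : PySem.List.insertBy before y l = l ++ [y] := by
  induction l with
  | nil => simp [PySem.List.insertBy]
  | cons z zs ih =>
    simp [PySem.List.insertBy, h z (by simp)]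
    exact ih (fun w hw => h w (by simp [hw]))

-- Inserting y lands right before the first element b that y is "before".
theorem insertBy_mid {α : Type} (before : α → α → Bool) (y b : α) (A B : List α)
    (hA : ∀ z ∈ A, before y z = false) (hb : before y b = true) :
    PySem.List.insertBy before y (A ++ b :: B) = A ++ y :: b :: B := by
  induction A with
  | nil => simp [PySem.List.insertBy, hb]
  | cons z zs ih =>
    simp [PySem.List.insertBy, hA z (by simp)]
    exact ih (fun w hw => hA w (by simp [hw]))

-- A stable sort on a 0/1-valued key is exactly "0-keyed elements, then 1-keyed elements", each group in order.
theorem sorted01 {α : Type} (ys : List α) (key : α → Int)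
    (h : ∀ y ∈ ys, key y = 0 ∨ key y = 1) :
    PySem.List.sorted ys key false =
      ys.filter (fun y => decide (key y = 0)) ++ ys.filter (fun y => decide (key y ≠ 0)) := by
  induction ys using List.reverseRecOn with
  | nil => simp [PySem.List.sorted]
  | append_singleton ys y ih =>
    have hys : ∀ z ∈ ys, key z = 0 ∨ key z = 1 := fun z hz => h z (by simp [hz])
    have step : PySem.List.sorted (ys ++ [y]) key false =
        PySem.List.insertBy (fun a b => decide (key a < key b)) y (PySem.List.sorted ys key false) := by
      simp [PySem.List.sorted, List.foldl_append]
    rw [step, ih hys]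
    rcases h y (by simp) with hy | hy
    · rcases hB : ys.filter (fun z => decide (key z ≠ 0)) with _ | ⟨b, B⟩
      · have hall : ∀ a ∈ ys, key a = 0 := by
          intro a ha
          rcases hys a ha with h0 | h1
          · exact h0
          · exfalso
            have hmem : a ∈ ys.filter (fun z => decide (key z ≠ 0)) := by
              simp [List.mem_filter, ha, h1]
            rw [hB] at hmem
            simp at hmem
        rw [insertBy_all_false]
        · simp [List.filter_append, hy]
          try exact hall
        · intro z hz
          simp only [List.append_nil] at hz
          have hz0 := (List.mem_filter.1 hz).2
          simp at hz0
          simp [hy, hz0]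
      · have hbmem : b ∈ ys.filter (fun z => decide (key z ≠ 0)) := by
          rw [hB]; simp
        have hb1 : key b = 1 := by
          rcases List.mem_filter.1 hbmem with ⟨hbys, hbne⟩
          simp at hbne
          rcases hys b hbys with h0 | h1
          · exact absurd h0 hbne
          · exact h1
        rw [insertBy_mid]
        · simp [List.filter_append, hy]
          rw [show (fun y => !decide (key y = 0)) = (fun z => decide (key z ≠ 0)) from by
            funext z; simp]
          exact hB.symm
        · intro z hz
          have hz0 := (List.mem_filter.1 hz).2
          simp at hz0
          simp [hy, hz0]
        · simp [hy, hb1]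
    · rw [insertBy_all_false]
      · simp [List.filter_append, hy]
      · intro z hz
        rcases List.mem_append.1 hz with hz | hz <;>
          rcases hys z (List.mem_filter.1 hz).1 with h0 | h0 <;> simp [hy, h0]

-- B's single stable sort equals A's pair of comprehensions whenever no considered total is negative.
theorem sort_split (t : String → Int) (cats : List String) (hnn : ∀ x ∈ cats, 0 ≤ t x) :
    PySem.List.sorted cats (fun x => if 0 < t x then (0 : Int) else 1) false =
    cats.filter (fun x => decide (0 < t x)) ++ cats.filter (fun x => decide (t x = 0)) := by
  rw [sorted01]
  · congr 1
    · apply List.filter_congr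
      intro x _
      by_cases h : 0 < t x <;> simp [h]
    · apply List.filter_congr
      intro x hx
      have := hnn x hx
      by_cases h : 0 < t x <;> simp [h] <;> omega
  · intro y _
    by_cases h : 0 < t y <;> simp [h]

-- Two mutually exclusive filters both missing a member x of l together keep fewer than all elements.
theorem countP_two_le {α : Type} (p q : α → Bool) (l : List α)
    (hpq : ∀ a, p a = true → q a = false) :
    l.countP p + l.countP q ≤ l.length := by
  induction l with
  | nil => simp
  | cons a l ih =>
    by_cases hpa : p a = true
    · simp [hpa, hpq a hpa]; omega
    · simp at hpa
      simp only [List.countP_cons, hpa]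
      by_cases hqa : q a = true <;> simp [hqa, List.length_cons] <;> omega

theorem countP_two_lt {α : Type} (p q : α → Bool) (l : List α) (x : α)
    (hx : x ∈ l) (hp : p x = false) (hq : q x = false)
    (hpq : ∀ a, p a = true → q a = false) :
    l.countP p + l.countP q < l.length := by
  induction l with
  | nil => cases hx
  | cons a l ih =>
    rcases List.mem_cons.1 hx with rfl | hxl
    · have := countP_two_le p q l hpq
      simp [hp, hq]
      omega
    · have := ih hxl
      by_cases hpa : p a = true
      · simp [hpa, hpq a hpa]; omega
      · simp at hpa
        simp only [List.countP_cons, hpa]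
        by_cases hqa : q a = true <;> simp [hqa, List.length_cons] <;> omega

-- ===== VERDICT (by name: the statements are the Claim_ definitions above) =====
theorem get_legal_category_order_spec : Claim_unchanged_get_legal_category_order := by
  intro results murs_enabled _ hnD
  rw [D_iff] at hnD
  simp only [not_exists, not_and] at hnD
  have hnn : ∀ x ∈ (["statutes", "regulations", "advisory_opinions"] ++
      (if murs_enabled then ["murs"] else [])), 0 ≤ pvGet results ("total_" ++ x) := by
    intro x hx
    have hk : ("total_" ++ x) ∈ (["total_statutes", "total_regulations", "total_advisory_opinions"] ++
        (if murs_enabled then ["total_murs"] else [])) := by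
      rw [keys_bridge]
      exact List.mem_map_of_mem hx
    have hno := hnD _ hk
    rw [lookup_eq_pvGet] at hno
    omega
  show get_legal_category_order results murs_enabled = get_legal_category_order_alt results murs_enabled
  unfold get_legal_category_order get_legal_category_order_alt
  cases murs_enabled
  · simp only [Bool.false_eq_true, if_false, List.append_nil] at hnn ⊢
    rw [sort_split (fun x => pvGet results ("total_" ++ x)) _ hnn]
  · simp only [if_true] at hnn ⊢
    rw [show (["statutes", "regulations", "advisory_opinions"] ++ ["murs"] :
      List String) = ["statutes", "regulations", "advisory_opinions", "murs"] from rfl] at hnn ⊢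
    rw [sort_split (fun x => pvGet results ("total_" ++ x)) _ hnn]

theorem get_legal_category_order_changed : Claim_changed_get_legal_category_order := by
  unfold Claim_changed_get_legal_category_order; decide

theorem get_legal_category_order_tight : Claim_exact_get_legal_category_order := by
  intro results murs_enabled _ hD heq
  rw [D_iff, keys_bridge] at hD
  obtain ⟨k, hk, hneg⟩ := hD
  obtain ⟨x, hx, rfl⟩ := List.mem_map.1 hk
  rw [lookup_eq_pvGet] at hneg
  have hx' : x ∈ (if murs_enabled then ["statutes", "regulations", "advisory_opinions", "murs"]
      else ["statutes", "regulations", "advisory_opinions"]) := by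
    cases murs_enabled <;> simpa using hx
  have hlen := congrArg List.length heq
  have hkey := countP_two_lt (fun y => decide (0 < pvGet results ("total_" ++ y)))
      (fun y => decide (pvGet results ("total_" ++ y) = 0))
      (if murs_enabled then ["statutes", "regulations", "advisory_opinions", "murs"]
        else ["statutes", "regulations", "advisory_opinions"]) x hx'
      (by simp; omega) (by simp; omega) (by intro a ha; simp at ha ⊢; omega)
  unfold get_legal_category_order get_legal_category_order_alt at hlen
  cases murs_enabled <;>
    simp only [Bool.false_eq_true, if_false, if_true, List.append_nil, List.length_append,
      ← List.countP_eq_length_filter, PySem.List.length_sorted, List.length_cons,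
      List.length_nil] at hlen hkey <;>
    omega
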